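-- pv_equiv track=rewrite | github.com/Mr-Vipul/LeetCode-DPP | December_2024/Day1.py | usingBinarySearch
-- ===== SOURCE A (Python) =====
-- def usingBinarySearch(arr):
--     n = len(arr)
--     """Time Complexity is O(n*logn)
--        Space Complexity is O(1)"""
--     arr.sort()
--     for i in range(len(arr)):
--         tar = 2*arr[i]
--         right = len(arr)-1
--         left = 0
--         while(left<=right):
--             mid = left + (right-left)//2
--             if arr[mid] == tar and mid!=i:
--                 return True
--             elif arr[mid] < tar:
--                 left = mid+1
--             else:
--                 right = mid-1
--
--     return False
-- ===== SOURCE B (Python) =====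
-- def usingBinarySearch(arr):
--     arr.sort()
--     n = len(arr)
--     i = j = 0
--     while i < n and j < n:
--         d = 2 * arr[i]
--         if d < arr[j]:
--             i += 1
--         elif d > arr[j]:
--             j += 1
--         elif i != j:
--             return True
--         else:
--             j += 1
--     return False
-- ===== Notes on version B (the rewrite author's own statement) =====
-- stated objective: faster
-- what changed: A runs a separate binary search (with an index-skip) for 2*arr[i] for every i; B does one simultaneous two-pointer merge over the sorted list, advancing i while 2*arr[i] < arr[j] and j otherwise, handling the self-match case (a zero) by stepping j.
import Mathlib
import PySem

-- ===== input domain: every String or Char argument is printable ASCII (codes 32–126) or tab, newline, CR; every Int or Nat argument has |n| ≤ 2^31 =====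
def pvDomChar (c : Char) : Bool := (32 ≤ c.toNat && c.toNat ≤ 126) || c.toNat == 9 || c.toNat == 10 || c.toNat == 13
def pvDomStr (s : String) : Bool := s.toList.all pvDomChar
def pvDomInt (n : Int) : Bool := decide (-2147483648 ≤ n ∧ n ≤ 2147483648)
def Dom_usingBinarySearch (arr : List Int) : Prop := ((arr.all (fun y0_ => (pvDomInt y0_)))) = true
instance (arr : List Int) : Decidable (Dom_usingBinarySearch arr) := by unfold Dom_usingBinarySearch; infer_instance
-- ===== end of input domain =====

-- B replaces A's per-element binary search with a single two-pointer merge over the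
-- sorted list (alternative decomposition; same O(n log n) total due to the sort).
-- A sorts its argument in place; equivalence proved here is about the RETURN value only
-- (Python B performs the same in-place sort). Loops are ported with an explicit fuel
-- argument that is always sufficient (fuel only makes the recursion structural).


-- ===== PORT A =====
-- inner while-loop of A: binary search for tar in s, skipping index i exactly as A does.
-- fuel bounds the iteration count (the interval length strictly shrinks each step).
def bsA (s : List Int) (tar : Int) (i : Int) : Nat → Int → Int → Bool
  | 0, _, _ => false
  | Nat.succ n, left, right =>
    if left ≤ right then
      let mid := left + PySem.Int.floordiv (right - left) 2
      match PySem.List.pyGet? s mid with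
      | none => false  -- unreachable: Python would raise IndexError, but mid stays in range
      | some v =>
        if v = tar ∧ mid ≠ i then true
        else if v < tar then bsA s tar i n (mid + 1) right
        else bsA s tar i n left (mid - 1)
    else false

-- outer for-loop of A, with early return; fuel = number of remaining indices
def outerA (s : List Int) : Nat → Nat → Bool
  | 0, _ => false
  | Nat.succ n, i =>
    if h : i < s.length then
      if bsA s (2 * s[i]) (i : Int) s.length 0 ((s.length : Int) - 1) then true
      else outerA s n (i + 1)
    else false

def usingBinarySearch (arr : List Int) : Bool :=
  let s := PySem.List.sorted arr (fun x => x) false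
  outerA s s.length 0

-- ===== PORT B =====
-- single two-pointer merge: advance i while 2*s[i] < s[j], j while 2*s[i] > s[j];
-- fuel bounds the iteration count (i + j grows each step).
def mergeB (s : List Int) : Nat → Nat → Nat → Bool
  | 0, _, _ => false
  | Nat.succ n, i, j =>
    if h : i < s.length ∧ j < s.length then
      let d := 2 * s[i]'h.1
      if d < s[j]'h.2 then mergeB s n (i + 1) j
      else if s[j]'h.2 < d then mergeB s n i (j + 1)
      else if i ≠ j then true
      else mergeB s n i (j + 1)
    else false

def usingBinarySearch_alt (arr : List Int) : Bool :=
  let s := PySem.List.sorted arr (fun x => x) false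
  mergeB s (2 * s.length + 1) 0 0

-- ===== PRECONDITION & SPEC =====
def Spec_usingBinarySearch (arr : List Int) (out : Bool) : Prop := out = usingBinarySearch_alt arr
instance (arr : List Int) (out : Bool) : Decidable (Spec_usingBinarySearch arr out) := by unfold Spec_usingBinarySearch; infer_instance

-- ===== CLAIM (what is proved, stated in full; the proofs are below) =====
def Claim_equal_usingBinarySearch : Prop := ∀ (arr : List Int), Dom_usingBinarySearch arr → Spec_usingBinarySearch arr (usingBinarySearch arr)

-- ===== LEMMAS AND PROOFS =====

-- the common specification both ports decide on the sorted list
def HasPair (s : List Int) : Prop :=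
  ∃ (a b : Nat) (ha : a < s.length) (hb : b < s.length), a ≠ b ∧ s[b] = 2 * s[a]

-- monotonicity of a (≤)-pairwise list at indices
theorem mono_of_pairwise {s : List Int} (hs : s.Pairwise (· ≤ ·))
    {p q : Nat} (hpq : p ≤ q) (hq : q < s.length) : s[p]'(by omega) ≤ s[q] := by
  rcases Nat.lt_or_ge p q with h | h
  · exact (List.pairwise_iff_getElem.mp hs) p q (by omega) hq h
  · have : p = q := by omega
    subst this; exact le_refl _

theorem bsA_sound (s : List Int) (tar : Int) (i : Int) :
    ∀ (n : Nat) (left right : Int), 0 ≤ left → right ≤ (s.length : Int) - 1 →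
      bsA s tar i n left right = true →
      ∃ (m : Nat) (hm : m < s.length), (m : Int) ≠ i ∧ s[m] = tar := by
  intro n
  induction n with
  | zero =>
    intro left right h1 h2 h
    simp only [bsA] at h
    exact absurd h (by simp)
  | succ n ih =>
    intro left right h1 h2 h
    simp only [bsA] at h
    by_cases hlr : left ≤ right
    · simp only [if_pos hlr] at h
      have hmid := PySem.Int.floordiv_two_mid_bounds (lo := 0) (hi := right - left) (by omega)
      simp only [zero_add] at hmid
      have hmid0 : (0:Int) ≤ left + PySem.Int.floordiv (right - left) 2 := by omega
      have hmidlt : left + PySem.Int.floordiv (right - left) 2 < (s.length : Int) := by omega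
      rw [PySem.List.pyGet?_eq_some_getElem s hmid0 hmidlt] at h
      simp only at h
      split at h
      next hc =>
        exact ⟨(left + PySem.Int.floordiv (right - left) 2).toNat, by omega, by omega,
          by rw [hc.1]⟩
      next hc =>
        split at h
        · exact ih _ right (by omega) h2 h
        · exact ih left _ h1 (by omega) h
    · rw [if_neg hlr] at h
      exact absurd h (by simp)

theorem bsA_complete (s : List Int) (hs : s.Pairwise (· ≤ ·)) (tar : Int) (i : Nat)
    (hi : i < s.length) (m : Nat) (hm : m < s.length) (hv : s[m] = tar)
    (hcond : s[i] = tar → m < i) :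
    ∀ (n : Nat) (left right : Int), (right + 1 - left).toNat ≤ n →
      0 ≤ left → right ≤ (s.length : Int) - 1 → left ≤ (m : Int) → (m : Int) ≤ right →
      bsA s tar (i : Int) n left right = true := by
  intro n
  induction n with
  | zero => intro left right hn h1 h2 h3 h4; omega
  | succ n ih =>
    intro left right hn h1 h2 h3 h4
    have hlr : left ≤ right := by omega
    simp only [bsA]
    simp only [if_pos hlr]
    have hmidb := PySem.Int.floordiv_two_mid_bounds (lo := 0) (hi := right - left) (by omega)
    simp only [zero_add] at hmidb
    have hmid0 : (0:Int) ≤ left + PySem.Int.floordiv (right - left) 2 := by omega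
    have hmidlt : left + PySem.Int.floordiv (right - left) 2 < (s.length : Int) := by omega
    rw [PySem.List.pyGet?_eq_some_getElem s hmid0 hmidlt]
    simp only
    set mid : Int := left + PySem.Int.floordiv (right - left) 2 with hmiddef
    have hmidnat : mid.toNat < s.length := by omega
    by_cases hc1 : s[mid.toNat] = tar ∧ mid ≠ (i : Int)
    · rw [if_pos hc1]
    · rw [if_neg hc1]
      by_cases hc2 : s[mid.toNat] < tar
      · rw [if_pos hc2]
        have hmgt : mid < (m : Int) := by
          by_contra hcn
          have := mono_of_pairwise hs (p := m) (q := mid.toNat) (by omega) hmidnat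
          omega
        exact ih (mid + 1) right (by omega) (by omega) h2 (by omega) h4
      · rw [if_neg hc2]
        rcases lt_trichotomy s[mid.toNat] tar with h' | h' | h'
        · omega
        · have hmideqi : mid = (i : Int) := by
            by_contra hne
            exact hc1 ⟨h', hne⟩
          have hieq : i = mid.toNat := by omega
          have h'' := h'
          simp only [← hieq] at h''
          have hlti : m < i := hcond h''
          exact ih left (mid - 1) (by omega) h1 (by omega) h3 (by omega)
        · have hmlt : (m : Int) < mid := by
            by_contra hcn
            have := mono_of_pairwise hs (p := mid.toNat) (q := m) (by omega) hm
            omega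
          exact ih left (mid - 1) (by omega) h1 (by omega) h3 (by omega)

theorem outerA_true_iff (s : List Int) :
    ∀ (n k : Nat), s.length - k = n →
      (outerA s n k = true ↔
        ∃ (i : Nat) (hi : i < s.length), k ≤ i ∧
          bsA s (2 * s[i]) (i : Int) s.length 0 ((s.length : Int) - 1) = true) := by
  intro n
  induction n with
  | zero =>
    intro k hk
    simp only [outerA]
    constructor
    · intro h; exact absurd h (by simp)
    · rintro ⟨i, hi, hki, _⟩; omega
  | succ n ih =>
    intro k hk
    have hk' : k < s.length := by omega
    simp only [outerA, dif_pos hk']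
    by_cases hb : bsA s (2 * s[k]) (k : Int) s.length 0 ((s.length : Int) - 1) = true
    · simp only [if_pos hb]
      constructor
      · intro _
        exact ⟨k, hk', le_rfl, hb⟩
      · intro _
        trivial
    · simp only [if_neg hb]
      rw [ih (k + 1) (by omega)]
      constructor
      · rintro ⟨i, hi, hki, h⟩; exact ⟨i, hi, by omega, h⟩
      · rintro ⟨i, hi, hki, h⟩
        refine ⟨i, hi, ?_, h⟩
        rcases Nat.eq_or_lt_of_le hki with he | hl
        · subst he; exact absurd h hb
        · omega

theorem portA_true_iff_hasPair (s : List Int) (hs : s.Pairwise (· ≤ ·)) :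
    outerA s s.length 0 = true ↔ HasPair s := by
  rw [outerA_true_iff s s.length 0 (by omega)]
  constructor
  · rintro ⟨i, hi, -, h⟩
    obtain ⟨m, hm, hne, hveq⟩ :=
      bsA_sound s (2 * s[i]) (i : Int) s.length 0 ((s.length : Int) - 1) (by omega) (by omega) h
    exact ⟨i, m, hi, hm, by omega, hveq⟩
  · rintro ⟨a, b, ha, hb, hab, heq⟩
    by_cases hz : s[a] = 2 * s[a]
    · -- s[a] = 0, two zeros: run the search from the larger of the two indices
      have hsb : s[b] = s[a] := by omega
      rcases Nat.lt_or_ge a b with hl | hl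
      · refine ⟨b, hb, by omega, ?_⟩
        apply bsA_complete s hs (2 * s[b]) b hb a ha (by omega) (fun _ => hl)
          s.length 0 ((s.length : Int) - 1) (by omega) le_rfl le_rfl (by omega) (by omega)
      · have hl' : b < a := by omega
        refine ⟨a, ha, by omega, ?_⟩
        apply bsA_complete s hs (2 * s[a]) a ha b hb (by omega) (fun _ => hl')
          s.length 0 ((s.length : Int) - 1) (by omega) le_rfl le_rfl (by omega) (by omega)
    · -- s[a] ≠ tar: the index-skip never fires, plain binary search finds b
      refine ⟨a, ha, by omega, ?_⟩
      apply bsA_complete s hs (2 * s[a]) a ha b hb heq (fun hc => absurd hc hz)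
        s.length 0 ((s.length : Int) - 1) (by omega) le_rfl le_rfl (by omega) (by omega)

theorem mergeB_sound (s : List Int) :
    ∀ (n i j : Nat), mergeB s n i j = true → HasPair s := by
  intro n
  induction n with
  | zero =>
    intro i j h
    simp only [mergeB] at h
    exact absurd h (by simp)
  | succ n ih =>
    intro i j h
    simp only [mergeB] at h
    split at h
    case isFalse => exact absurd h (by simp)
    case isTrue hin =>
      split at h
      · exact ih (i + 1) j h
      · split at h
        · exact ih i (j + 1) h
        · split at h
          case isTrue hij => exact ⟨i, j, hin.1, hin.2, hij, by omega⟩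
          case isFalse => exact ih i (j + 1) h

theorem mergeB_complete (s : List Int) (hs : s.Pairwise (· ≤ ·)) :
    ∀ (n i j a b : Nat), (s.length - i) + (s.length - j) ≤ n →
      i ≤ a → j ≤ b → (ha : a < s.length) → (hb : b < s.length) →
      a ≠ b → s[b] = 2 * s[a] → mergeB s n i j = true := by
  intro n
  induction n with
  | zero => intro i j a b hn h1 h2 ha hb h3 h4; omega
  | succ n ih =>
    intro i j a b hn h1 h2 ha hb h3 h4
    have hij : i < s.length ∧ j < s.length := ⟨by omega, by omega⟩
    simp only [mergeB]
    simp only [dif_pos hij]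
    by_cases hc1 : 2 * s[i]'hij.1 < s[j]'hij.2
    · rw [if_pos hc1]
      have hai : i < a := by
        rcases Nat.eq_or_lt_of_le h1 with he | hl
        · exfalso
          subst he
          have := mono_of_pairwise hs (p := j) (q := b) h2 hb
          omega
        · exact hl
      exact ih (i + 1) j a b (by omega) hai h2 ha hb h3 h4
    · rw [if_neg hc1]
      by_cases hc2 : s[j]'hij.2 < 2 * s[i]'hij.1
      · rw [if_pos hc2]
        have hbj : j < b := by
          rcases Nat.eq_or_lt_of_le h2 with he | hl
          · exfalso
            subst he
            have := mono_of_pairwise hs (p := i) (q := a) h1 ha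
            omega
          · exact hl
        exact ih i (j + 1) a b (by omega) h1 hbj ha hb h3 h4
      · rw [if_neg hc2]
        by_cases hc3 : i ≠ j
        · rw [if_pos hc3]
        · rw [if_neg hc3]
          -- i = j and 2*s[i] = s[j], so s[i] = 0
          have hieq : i = j := by omega
          have hzero : s[i]'hij.1 = 0 := by
            have h0 : 2 * s[i]'hij.1 = s[j]'hij.2 := by omega
            subst hieq; omega
          rcases Nat.lt_or_ge j b with hjb | hjb
          · -- keep the pair (a, b)
            exact ih i (j + 1) a b (by omega) h1 hjb ha hb h3 h4
          · -- b = j, so s[a] = 0 with a > j; zeros fill j..a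
            have hbeq : b = j := by omega
            have hsb0 : s[b] = 0 := by subst hbeq hieq; omega
            have hsa0 : s[a] = 0 := by omega
            have haj : j < a := by omega
            have hjs : j + 1 < s.length := by omega
            have hsj1 : s[j + 1] = 0 := by
              have hle1 := mono_of_pairwise hs (p := j) (q := j + 1) (by omega) hjs
              have hle2 := mono_of_pairwise hs (p := j + 1) (q := a) (by omega) ha
              subst hbeq; omega
            by_cases hja : a = j + 1
            · -- pair (j, j+1)
              apply ih i (j + 1) j (j + 1) (by omega) (by omega) le_rfl (by omega) hjs (by omega)
              subst hieq; omega
            · -- pair (a, j+1)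
              apply ih i (j + 1) a (j + 1) (by omega) h1 le_rfl ha hjs (by omega)
              omega

theorem portB_true_iff_hasPair (s : List Int) (hs : s.Pairwise (· ≤ ·)) :
    mergeB s (2 * s.length + 1) 0 0 = true ↔ HasPair s := by
  constructor
  · exact mergeB_sound s (2 * s.length + 1) 0 0
  · rintro ⟨a, b, ha, hb, hab, heq⟩
    exact mergeB_complete s hs (2 * s.length + 1) 0 0 a b (by omega) (by omega) (by omega) ha hb hab heq

-- ===== VERDICT (by name: the statement is the Claim_ definition above) =====
theorem usingBinarySearch_spec : Claim_equal_usingBinarySearch := by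
  intro arr _
  unfold Spec_usingBinarySearch usingBinarySearch usingBinarySearch_alt
  set s := PySem.List.sorted arr (fun x => x) false with hsdef
  have hs : s.Pairwise (· ≤ ·) := by
    have := PySem.List.sorted_pairwise (xs := arr) (key := fun x => x)
    simpa using this
  simp only
  rw [Bool.eq_iff_iff, portA_true_iff_hasPair s hs, portB_true_iff_hasPair s hs]
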